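-- pv_equiv track=rewrite | github.com/MedvedMichael/python-words | main.py | filter_from_compounds
-- ===== SOURCE A (Python) =====
-- def filter_from_compounds(word_set):
--     compounds = []
--     for i in range(len(word_set)):
--         if len(word_set[i]) <= 2:
--             continue
--
--         for j in range(len(word_set)):
--             if i == j or len(word_set[j]) <= 2:
--                 continue
--
--             if abs(len(word_set[i]) - len(word_set[j])) > 2:
--                 if word_set[i] in word_set[j]:
--                     compounds.append(word_set[j])
--                 elif word_set[j] in word_set[i]:
--                     compounds.append(word_set[i])
--
--     return (list(filter(lambda x: x not in compounds, word_set)), compounds)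
-- ===== SOURCE B (Python) =====
-- def filter_from_compounds(word_set):
--     # Inverted substring index instead of pairwise substring tests:
--     # for each long word, enumerate its substrings with length >= 3 and margin > 2,
--     # index "substring -> positions of containing words" and "word -> its positions",
--     # then assemble each row from index lookups in ascending position order.
--     longs = [w for w in word_set if len(w) > 2]
--     subw = [{w[i:i + k] for k in range(3, len(w) - 2) for i in range(len(w) - k + 1)}
--             for w in longs]
--     contains = {}   # substring -> set of positions of long words containing it (margin > 2)
--     pos_of = {}     # long word value -> set of its positions
--     for p in range(len(longs)):
--         for s in subw[p]:
--             contains.setdefault(s, set()).add(p)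
--         pos_of.setdefault(longs[p], set()).add(p)
--     compounds = []
--     for a, ss in zip(longs, subw):
--         big = contains.get(a, set())        # longer words containing a
--         small = set()                       # shorter words contained in a
--         for s in ss:
--             small |= pos_of.get(s, set())
--         for p in sorted(big | small):
--             compounds.append(longs[p] if p in big else a)
--     bad = set(compounds)
--     return ([w for w in word_set if w not in bad], compounds)
-- ===== Notes on version B (the rewrite author's own statement) =====
-- stated objective: faster
-- what changed: B replaces A's O(n^2) pairwise substring tests by an inverted substring index: each long word's substrings of length >= 3 with margin > 2 are enumerated once into dicts (substring -> containing positions, word -> positions), and each word's compound row is assembled from two index lookups over sorted positions instead of scanning all other words.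
import Mathlib
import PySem

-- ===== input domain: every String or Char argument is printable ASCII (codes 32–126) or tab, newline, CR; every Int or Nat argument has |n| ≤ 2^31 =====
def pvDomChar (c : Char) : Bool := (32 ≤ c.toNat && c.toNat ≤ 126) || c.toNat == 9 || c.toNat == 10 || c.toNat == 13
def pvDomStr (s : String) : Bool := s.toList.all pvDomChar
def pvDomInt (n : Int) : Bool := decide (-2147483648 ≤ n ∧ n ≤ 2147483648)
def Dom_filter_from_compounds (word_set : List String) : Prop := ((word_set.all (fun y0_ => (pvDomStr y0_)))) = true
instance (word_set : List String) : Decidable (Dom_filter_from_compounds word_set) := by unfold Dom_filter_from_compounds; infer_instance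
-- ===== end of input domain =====

-- B: instead of A's pairwise substring tests, B builds an inverted substring index
-- (substring -> positions, word -> positions) over the long words and assembles each
-- row from index lookups on sorted positions (alternative algorithm; measurably faster).
-- ===== PORT A =====
def filter_from_compounds (word_set : List String) : List String × List String :=
  let n : Int := word_set.length
  let compounds : List String :=
    (PySem.List.pyRange 0 n 1).foldl (fun compounds i =>
      let wi := PySem.List.pyGetD word_set i ""
      if PySem.Str.len wi ≤ 2 then compounds
      else
        (PySem.List.pyRange 0 n 1).foldl (fun compounds j =>
          let wj := PySem.List.pyGetD word_set j ""
          if i == j || PySem.Str.len wj ≤ 2 then compounds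
          else if 2 < ((PySem.Str.len wi : Int) - (PySem.Str.len wj : Int)).natAbs then
            if PySem.Str.isIn wi wj then compounds ++ [wj]
            else if PySem.Str.isIn wj wi then compounds ++ [wi]
            else compounds
          else compounds) compounds) []
  (word_set.filter (fun x => !(compounds.contains x)), compounds)

-- ===== PORT B =====
-- Source B's set comprehension: distinct substrings of w with length >= 3 and margin > 2
def pvSubw (w : String) : PySem.Set String :=
  PySem.Set.ofList ((PySem.List.pyRange 3 ((PySem.Str.len w : Int) - 2) 1).flatMap (fun k =>
    (PySem.List.pyRange 0 ((PySem.Str.len w : Int) - k + 1) 1).map (fun i =>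
      PySem.Str.slice w (some i) (some (i + k)))))

def filter_from_compounds_alt (word_set : List String) : List String × List String :=
  let longs := word_set.filter (fun w => 2 < PySem.Str.len w)
  let subw := longs.map pvSubw
  let idx :=
    (PySem.List.pyRange 0 (longs.length : Int) 1).foldl
      (fun (cp : PySem.Dict String (PySem.Set Int) × PySem.Dict String (PySem.Set Int)) p =>
        ((PySem.List.pyGetD subw p PySem.Set.empty).foldl
            (fun c s => PySem.Dict.modify c s PySem.Set.empty (fun t => PySem.Set.add t p)) cp.1,
         PySem.Dict.modify cp.2 (PySem.List.pyGetD longs p "") PySem.Set.empty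
            (fun t => PySem.Set.add t p)))
      (PySem.Dict.empty, PySem.Dict.empty)
  let compounds := (longs.zip subw).foldl (fun compounds az =>
      let big := PySem.Dict.getD idx.1 az.1 PySem.Set.empty
      let small := az.2.foldl
          (fun sm s => PySem.Set.union sm (PySem.Dict.getD idx.2 s PySem.Set.empty))
          PySem.Set.empty
      (PySem.List.sorted (PySem.Set.union big small) (fun x => x)).foldl
        (fun compounds p =>
          compounds ++ [if PySem.Set.contains big p then PySem.List.pyGetD longs p "" else az.1])
        compounds) []
  let bad := PySem.Set.ofList compounds
  (word_set.filter (fun x => !(PySem.Set.contains bad x)), compounds)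

-- ===== PRECONDITION & SPEC =====
def Spec_filter_from_compounds (word_set : List String) (out : List String × List String) : Prop := out = filter_from_compounds_alt word_set
instance (word_set : List String) (out : List String × List String) : Decidable (Spec_filter_from_compounds word_set out) := by unfold Spec_filter_from_compounds; infer_instance

-- ===== CLAIM (what is proved, stated in full; the proofs are below) =====
def Claim_equal_filter_from_compounds : Prop := ∀ (word_set : List String), Dom_filter_from_compounds word_set → Spec_filter_from_compounds word_set (filter_from_compounds word_set)

-- ===== LEMMAS AND PROOFS =====

-- A's inner-loop body as a function of the two word values (the i==j guard removed)
def pvG (wi : String) (acc : List String) (wj : String) : List String :=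
  if PySem.Str.len wj ≤ 2 then acc
  else if 2 < (PySem.Str.len wi - PySem.Str.len wj).natAbs then
    if PySem.Str.isIn wi wj then acc ++ [wj]
    else if PySem.Str.isIn wj wi then acc ++ [wi]
    else acc
  else acc

-- the per-pair condition of both programs, stated on values
def pvBCond (a b : String) : Bool :=
  decide (2 < ((PySem.Str.len a : Int) - (PySem.Str.len b : Int)).natAbs) &&
    (if PySem.Str.len a < PySem.Str.len b then PySem.Str.isIn a b else PySem.Str.isIn b a)

-- the row of compounds contributed by one long word a
def pvRow (longs : List String) (a : String) : List String :=
  (longs.filter (fun b => pvBCond a b)).map (fun b => if PySem.Str.len a < PySem.Str.len b then b else a)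

theorem pv_len_le_of_isIn (a b : String) (h : PySem.Str.isIn a b = true) :
    PySem.Str.len a ≤ PySem.Str.len b := by
  have h2 := ((PySem.Str.isIn_iff_infix a b).mp h).length_le
  simp only [PySem.Str.len_eq]
  exact_mod_cast h2

-- the i==j guard is redundant: when i = j the length difference is 0
theorem pv_inner_fold (ws : List String) (i : Int) (wi : String)
    (hwi : wi = PySem.List.pyGetD ws i "") (acc : List String) :
    (PySem.List.pyRange 0 (ws.length : Int) 1).foldl (fun acc j =>
        let wj := PySem.List.pyGetD ws j ""
        if i == j || PySem.Str.len wj ≤ 2 then acc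
        else if 2 < (PySem.Str.len wi - PySem.Str.len wj).natAbs then
          if PySem.Str.isIn wi wj then acc ++ [wj]
          else if PySem.Str.isIn wj wi then acc ++ [wi]
          else acc
        else acc) acc
      = ws.foldl (pvG wi) acc := by
  rw [← PySem.List.foldl_pyRange_zero_pyGetD' ws "" (pvG wi) acc]
  apply congrArg (fun f => List.foldl f acc (PySem.List.pyRange 0 (ws.length : Int) 1))
  funext acc j
  by_cases hij : i = j
  · subst hij
    simp only [BEq.rfl, Bool.true_or, if_true, pvG, ← hwi, sub_self]
    by_cases h2 : PySem.Str.len wi ≤ 2 <;> simp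
  · have hb : (i == j) = false := by simp [hij]
    simp only [hb, Bool.false_or, pvG, decide_eq_true_eq]

-- inner loop over all words = inner loop over the long words only
theorem pv_inner_filter (ws : List String) (wi : String) (acc : List String) :
    ws.foldl (pvG wi) acc
      = (ws.filter (fun w => 2 < PySem.Str.len w)).foldl (fun acc wj =>
          if 2 < (PySem.Str.len wi - PySem.Str.len wj).natAbs then
            if PySem.Str.isIn wi wj then acc ++ [wj]
            else if PySem.Str.isIn wj wi then acc ++ [wi]
            else acc
          else acc) acc := by
  rw [List.foldl_filter]
  apply congrArg (fun f => List.foldl f acc ws)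
  funext acc wj
  simp only [pvG, decide_eq_true_eq]
  split_ifs <;> first | rfl | omega

-- the guarded double test per pair = the single directed test on values
theorem pv_body_eq (wi wj : String) (acc : List String) :
    (if 2 < (PySem.Str.len wi - PySem.Str.len wj).natAbs then
      if PySem.Str.isIn wi wj then acc ++ [wj]
      else if PySem.Str.isIn wj wi then acc ++ [wi]
      else acc
    else acc)
      = if pvBCond wi wj then acc ++ [if PySem.Str.len wi < PySem.Str.len wj then wj else wi] else acc := by
  by_cases hd : 2 < (PySem.Str.len wi - PySem.Str.len wj).natAbs
  · by_cases hlt : PySem.Str.len wi < PySem.Str.len wj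
    · have hji : PySem.Str.isIn wj wi = false := by
        cases h : PySem.Str.isIn wj wi
        · rfl
        · have := pv_len_le_of_isIn wj wi h; omega
      simp only [pvBCond, hd, hlt, if_true, hji, decide_true, Bool.true_and]
      cases h : PySem.Str.isIn wi wj <;> simp
    · have hij : PySem.Str.isIn wi wj = false := by
        cases h : PySem.Str.isIn wi wj
        · rfl
        · have hle := pv_len_le_of_isIn wi wj h
          have hne : PySem.Str.len wi ≠ PySem.Str.len wj := by
            intro he; rw [he] at hd; simp at hd
          omega
      simp only [pvBCond, hd, hlt, if_false, hij, decide_true, Bool.true_and]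
      cases h : PySem.Str.isIn wj wi <;> simp
  · have hb : pvBCond wi wj = false := by
      simp only [pvBCond, hd, decide_false, Bool.false_and]
    rw [if_neg hd, hb]
    simp

theorem pv_compounds_eq (ws : List String) :
    (PySem.List.pyRange 0 (ws.length : Int) 1).foldl (fun compounds i =>
      let wi := PySem.List.pyGetD ws i ""
      if PySem.Str.len wi ≤ 2 then compounds
      else
        (PySem.List.pyRange 0 (ws.length : Int) 1).foldl (fun compounds j =>
          let wj := PySem.List.pyGetD ws j ""
          if i == j || PySem.Str.len wj ≤ 2 then compounds
          else if 2 < (PySem.Str.len wi - PySem.Str.len wj).natAbs then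
            if PySem.Str.isIn wi wj then compounds ++ [wj]
            else if PySem.Str.isIn wj wi then compounds ++ [wi]
            else compounds
          else compounds) compounds) []
      = (ws.filter (fun w => 2 < PySem.Str.len w)).flatMap
          (pvRow (ws.filter (fun w => 2 < PySem.Str.len w))) := by
  have h1 : (fun (compounds : List String) (i : Int) =>
        let wi := PySem.List.pyGetD ws i ""
        if PySem.Str.len wi ≤ 2 then compounds
        else
          (PySem.List.pyRange 0 (ws.length : Int) 1).foldl (fun compounds j =>
            let wj := PySem.List.pyGetD ws j ""
            if i == j || PySem.Str.len wj ≤ 2 then compounds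
            else if 2 < (PySem.Str.len wi - PySem.Str.len wj).natAbs then
              if PySem.Str.isIn wi wj then compounds ++ [wj]
              else if PySem.Str.isIn wj wi then compounds ++ [wi]
              else compounds
            else compounds) compounds)
      = (fun compounds i =>
          (fun acc wi => if PySem.Str.len wi ≤ 2 then acc else ws.foldl (pvG wi) acc)
            compounds (PySem.List.pyGetD ws i "")) := by
    funext compounds i
    dsimp only
    by_cases h2 : PySem.Str.len (PySem.List.pyGetD ws i "") ≤ 2
    · rw [if_pos h2, if_pos h2]
    · rw [if_neg h2, if_neg h2]
      exact pv_inner_fold ws i _ rfl compounds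
  calc _ = (PySem.List.pyRange 0 (ws.length : Int) 1).foldl (fun acc i =>
            (fun acc wi => if PySem.Str.len wi ≤ 2 then acc else ws.foldl (pvG wi) acc)
              acc (PySem.List.pyGetD ws i "")) [] := by rw [h1]
    _ = ws.foldl (fun acc wi => if PySem.Str.len wi ≤ 2 then acc else ws.foldl (pvG wi) acc) [] :=
          PySem.List.foldl_pyRange_zero_pyGetD' ws ""
            (fun acc wi => if PySem.Str.len wi ≤ 2 then acc else ws.foldl (pvG wi) acc) []
    _ = (ws.filter (fun w => 2 < PySem.Str.len w)).foldl
          (fun acc wi => acc ++ pvRow (ws.filter (fun w => 2 < PySem.Str.len w)) wi) [] := by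
          rw [List.foldl_filter]
          apply congrArg (fun f => List.foldl f [] ws)
          funext acc wi
          have hrow : ws.foldl (pvG wi) acc
              = acc ++ pvRow (ws.filter (fun w => 2 < PySem.Str.len w)) wi := by
            rw [pv_inner_filter]
            have hb : (fun acc wj =>
                if 2 < (PySem.Str.len wi - PySem.Str.len wj).natAbs then
                  if PySem.Str.isIn wi wj then acc ++ [wj]
                  else if PySem.Str.isIn wj wi then acc ++ [wi]
                  else acc
                else acc)
              = (fun (acc : List String) wj =>
                if pvBCond wi wj then acc ++ [if PySem.Str.len wi < PySem.Str.len wj then wj else wi] else acc) := by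
              funext acc wj; exact pv_body_eq wi wj acc
            rw [hb, PySem.List.foldl_append_if (fun wj => pvBCond wi wj)
              (fun wj => if PySem.Str.len wi < PySem.Str.len wj then wj else wi)]
            rfl
          split_ifs with hc1 hc2 hc3 <;> try rfl
          · exfalso; simp only [decide_eq_true_eq] at hc2; omega
          · exact hrow
          · exfalso; simp only [decide_eq_true_eq] at hc3; omega
    _ = _ := by
          rw [PySem.List.foldl_append_eq_flatMap]
          simp

-- ---------- B-side characterizations ----------

-- membership in the substring set of Source B's comprehension
theorem pv_mem_subw (s w : String) :
    s ∈ pvSubw w ↔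
      (PySem.Str.isIn s w = true ∧ 3 ≤ PySem.Str.len s ∧ PySem.Str.len s + 3 ≤ PySem.Str.len w) := by
  have hW : PySem.Str.len w = (w.toList.length : Int) := by simp [PySem.Str.len_eq]
  have hS : PySem.Str.len s = (s.toList.length : Int) := by simp [PySem.Str.len_eq]
  unfold pvSubw
  rw [PySem.Set.mem_ofList]
  simp only [List.mem_flatMap, List.mem_map, PySem.List.mem_pyRange_one]
  constructor
  · rintro ⟨k, ⟨hk3, hkU⟩, i, ⟨hi0, hiU⟩, hsl⟩
    lift k to ℕ using (by omega : (0:Int) ≤ k)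
    lift i to ℕ using hi0
    have hslice : s.toList = (w.toList.drop i).take k := by
      rw [← hsl]; simp [PySem.List.slice_natCast_add]
    rw [hW] at hkU hiU
    have hik : i + k ≤ w.toList.length := by omega
    have hlen : s.toList.length = k := by
      rw [hslice, List.length_take, List.length_drop]; omega
    refine ⟨?_, ?_, ?_⟩
    · rw [PySem.Str.isIn_iff_infix, hslice]
      exact (List.take_prefix k _).isInfix.trans (List.drop_suffix i _).isInfix
    · rw [hS, hlen]; omega
    · rw [hS, hW, hlen]; omega
  · rintro ⟨hin, h3, hU⟩
    obtain ⟨u, v, huv⟩ := (PySem.Str.isIn_iff_infix s w).mp hin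
    have hlenw : w.toList.length = u.length + s.toList.length + v.length := by
      rw [← huv]; simp [List.length_append]; omega
    rw [hS] at h3
    rw [hS, hW] at hU
    refine ⟨(s.toList.length : Int), ⟨by omega, by omega⟩,
            (u.length : Int), ⟨by omega, by omega⟩, ?_⟩
    apply String.toList_inj.mp
    have hslice : (PySem.Str.slice w (some (u.length : Int))
        (some ((u.length : Int) + (s.toList.length : Int)))).toList
        = (w.toList.drop u.length).take s.toList.length := by
      simp [PySem.List.slice_natCast_add]
    rw [hslice, ← huv, List.append_assoc, List.drop_left, List.take_left]

-- one index-building step over the substrings of one word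
theorem pv_getD_foldl_modify (L : List String) (c : PySem.Dict String (PySem.Set Int)) (p : Int) (s : String) :
    ((L.foldl (fun c s => PySem.Dict.modify c s PySem.Set.empty (fun t => PySem.Set.add t p)) c).getD s PySem.Set.empty)
      = if s ∈ L then PySem.Set.add (PySem.Dict.getD c s PySem.Set.empty) p
        else PySem.Dict.getD c s PySem.Set.empty := by
  induction L generalizing c with
  | nil => simp
  | cons h0 tl ih =>
    simp only [List.foldl_cons, ih, PySem.Dict.getD_modify]
    by_cases hs : s ∈ tl
    · by_cases he : s = h0 <;> simp [hs, he]
    · by_cases he : s = h0 <;> simp [hs, he]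

-- the whole 'contains' index fold, looked up at one key
theorem pv_getD_contains_fold (ps : List Int) (F : Int → List String)
    (c0 : PySem.Dict String (PySem.Set Int)) (s : String) :
    ((ps.foldl (fun c p => (F p).foldl
        (fun c s => PySem.Dict.modify c s PySem.Set.empty (fun t => PySem.Set.add t p)) c) c0).getD s PySem.Set.empty)
      = ps.foldl (fun t p => if s ∈ F p then PySem.Set.add t p else t)
          (PySem.Dict.getD c0 s PySem.Set.empty) := by
  induction ps generalizing c0 with
  | nil => rfl
  | cons p tl ih => simp only [List.foldl_cons, ih, pv_getD_foldl_modify]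

-- the 'pos_of' index fold, looked up at one key
theorem pv_getD_pos_fold (ps : List Int) (key : Int → String)
    (d0 : PySem.Dict String (PySem.Set Int)) (s : String) :
    ((ps.foldl (fun d p => PySem.Dict.modify d (key p) PySem.Set.empty (fun t => PySem.Set.add t p)) d0).getD s PySem.Set.empty)
      = ps.foldl (fun t p => if s = key p then PySem.Set.add t p else t)
          (PySem.Dict.getD d0 s PySem.Set.empty) := by
  induction ps generalizing d0 with
  | nil => rfl
  | cons p tl ih =>
    by_cases he : s = key p
    · subst he
      simp only [List.foldl_cons, ih, PySem.Dict.getD_modify]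
    · simp only [List.foldl_cons, ih, PySem.Dict.getD_modify, if_neg he]

-- conditional adds of fresh increasing positions build exactly the filtered list
theorem pv_foldl_if_add (ps : List Int) (P : Int → Prop) [DecidablePred P] (t : List Int)
    (hdisj : ∀ p ∈ ps, p ∉ t) (hnd : ps.Nodup) :
    ps.foldl (fun t p => if P p then PySem.Set.add t p else t) t
      = t ++ ps.filter (fun p => decide (P p)) := by
  induction ps generalizing t with
  | nil => simp
  | cons p tl ih =>
    have hnd' := hnd
    rw [List.nodup_cons] at hnd'
    simp only [List.foldl_cons, List.filter_cons]
    by_cases hp : P p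
    · rw [if_pos hp, PySem.Set.add_of_not_mem (hdisj p (List.mem_cons_self))]
      rw [ih (t ++ [p]) ?_ hnd'.2]
      · simp [hp]
      · intro q hq hmem
        rcases List.mem_append.mp hmem with h | h
        · exact hdisj q (List.mem_cons_of_mem _ hq) h
        · rw [List.mem_singleton] at h; subst h; exact hnd'.1 hq
    · rw [if_neg hp, ih t (fun q hq => hdisj q (List.mem_cons_of_mem _ hq)) hnd'.2]
      simp [hp]

theorem pv_nodup_pyRange (n : Nat) : (PySem.List.pyRange 0 (n : Int) 1).Nodup := by
  rw [PySem.List.pyRange_zero_natCast]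
  exact List.nodup_range.map (fun a b h => by exact_mod_cast h)

theorem pv_pairwise_pyRange (n : Nat) :
    (PySem.List.pyRange 0 (n : Int) 1).Pairwise (· < ·) := by
  rw [PySem.List.pyRange_zero_natCast]
  exact List.pairwise_lt_range.map _ (fun a b h => by exact_mod_cast h)

theorem pv_mem_foldl_union (L : List String) (G : String → PySem.Set Int)
    (sm : PySem.Set Int) (q : Int) :
    (q ∈ L.foldl (fun sm s => PySem.Set.union sm (G s)) sm) ↔ q ∈ sm ∨ ∃ s ∈ L, q ∈ G s := by
  induction L generalizing sm with
  | nil => simp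
  | cons h tl ih =>
    simp only [List.foldl_cons, ih, PySem.Set.mem_union, List.mem_cons]
    constructor
    · rintro ((h1 | h1) | ⟨s, hs, hq⟩)
      · exact Or.inl h1
      · exact Or.inr ⟨h, Or.inl rfl, h1⟩
      · exact Or.inr ⟨s, Or.inr hs, hq⟩
    · rintro (h1 | ⟨s, (rfl | hs), hq⟩)
      · exact Or.inl (Or.inl h1)
      · exact Or.inl (Or.inr hq)
      · exact Or.inr ⟨s, hs, hq⟩

theorem pv_subw_empty : pvSubw "" = PySem.Set.empty := rfl

theorem pv_F_eq (longs : List String) (p : Int) :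
    PySem.List.pyGetD (longs.map pvSubw) p PySem.Set.empty
      = pvSubw (PySem.List.pyGetD longs p "") := by
  rw [← pv_subw_empty, PySem.List.pyGetD_map]

theorem pv_g_mem (l : List String) (p : Int)
    (hp : p ∈ PySem.List.pyRange 0 (l.length : Int) 1) :
    PySem.List.pyGetD l p "" ∈ l := by
  rw [PySem.List.mem_pyRange_one] at hp
  obtain ⟨h0, hlt⟩ := hp
  lift p to ℕ using h0
  rw [PySem.List.pyGetD_natCast]
  have hl : p < l.length := by exact_mod_cast hlt
  rw [List.getD_eq_getElem l "" hl]
  exact List.getElem_mem hl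

-- the per-pair condition, through the substring sets
theorem pv_cond_iff (a b : String) (ha : 2 < PySem.Str.len a) (hb : 2 < PySem.Str.len b) :
    (pvBCond a b = true) ↔ (a ∈ pvSubw b ∨ b ∈ pvSubw a) := by
  rw [pv_mem_subw, pv_mem_subw]
  unfold pvBCond
  simp only [Bool.and_eq_true, decide_eq_true_eq]
  constructor
  · rintro ⟨hd, hif⟩
    by_cases hlt : PySem.Str.len a < PySem.Str.len b
    · rw [if_pos hlt] at hif
      exact Or.inl ⟨hif, by omega, by omega⟩
    · rw [if_neg hlt] at hif
      exact Or.inr ⟨hif, by omega, by omega⟩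
  · rintro (⟨hin, h3, hU⟩ | ⟨hin, h3, hU⟩)
    · have hlt : PySem.Str.len a < PySem.Str.len b := by omega
      exact ⟨by omega, by rw [if_pos hlt]; exact hin⟩
    · have hlt : ¬ PySem.Str.len a < PySem.Str.len b := by omega
      exact ⟨by omega, by rw [if_neg hlt]; exact hin⟩

-- one row of B equals pvRow
theorem pv_row (longs : List String) (hl : ∀ x ∈ longs, 2 < PySem.Str.len x)
    (a : String) (ha : a ∈ longs) (comp : List String) :
    (PySem.List.sorted
        (PySem.Set.union
          (PySem.Dict.getD
            (((PySem.List.pyRange 0 (longs.length : Int) 1).foldl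
              (fun c p => (PySem.List.pyGetD (longs.map pvSubw) p PySem.Set.empty).foldl
                  (fun c s => PySem.Dict.modify c s PySem.Set.empty (fun t => PySem.Set.add t p)) c)
              PySem.Dict.empty))
            a PySem.Set.empty)
          ((pvSubw a).foldl
            (fun sm s => PySem.Set.union sm (PySem.Dict.getD
              (((PySem.List.pyRange 0 (longs.length : Int) 1).foldl
                (fun d p => PySem.Dict.modify d (PySem.List.pyGetD longs p "") PySem.Set.empty
                  (fun t => PySem.Set.add t p)) PySem.Dict.empty))
              s PySem.Set.empty)) PySem.Set.empty))
        (fun x => x)).foldl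
      (fun comp p =>
        comp ++ [if PySem.Set.contains
            (PySem.Dict.getD
              (((PySem.List.pyRange 0 (longs.length : Int) 1).foldl
                (fun c p => (PySem.List.pyGetD (longs.map pvSubw) p PySem.Set.empty).foldl
                    (fun c s => PySem.Dict.modify c s PySem.Set.empty (fun t => PySem.Set.add t p)) c)
                PySem.Dict.empty))
              a PySem.Set.empty) p
          then PySem.List.pyGetD longs p "" else a]) comp
    = comp ++ pvRow longs a := by
  set ps := PySem.List.pyRange 0 (longs.length : Int) 1 with hps
  set g : Int → String := fun p => PySem.List.pyGetD longs p "" with hg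
  have hgm : ∀ p ∈ ps, g p ∈ longs := fun p hp => pv_g_mem longs p hp
  have hbig : PySem.Dict.getD
      ((ps.foldl
        (fun c p => (PySem.List.pyGetD (longs.map pvSubw) p PySem.Set.empty).foldl
            (fun c s => PySem.Dict.modify c s PySem.Set.empty (fun t => PySem.Set.add t p)) c)
        PySem.Dict.empty)) a PySem.Set.empty
      = ps.filter (fun p => decide (a ∈ pvSubw (g p))) := by
    rw [pv_getD_contains_fold, PySem.Dict.getD_empty]
    rw [pv_foldl_if_add ps _ PySem.Set.empty (fun p _ => by simp [PySem.Set.empty])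
      (hps ▸ pv_nodup_pyRange longs.length)]
    simp only [pv_F_eq]
    rfl
  have hpos : ∀ sk, PySem.Dict.getD
      ((ps.foldl
        (fun d p => PySem.Dict.modify d (PySem.List.pyGetD longs p "") PySem.Set.empty
          (fun t => PySem.Set.add t p)) PySem.Dict.empty)) sk PySem.Set.empty
      = ps.filter (fun p => decide (sk = g p)) := by
    intro sk
    rw [pv_getD_pos_fold, PySem.Dict.getD_empty]
    rw [pv_foldl_if_add ps _ PySem.Set.empty (fun p _ => by simp [PySem.Set.empty])
      (hps ▸ pv_nodup_pyRange longs.length)]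
    rfl
  have hsmall : ∀ q, (q ∈ (pvSubw a).foldl
      (fun sm s => PySem.Set.union sm (PySem.Dict.getD
        ((ps.foldl
          (fun d p => PySem.Dict.modify d (PySem.List.pyGetD longs p "") PySem.Set.empty
            (fun t => PySem.Set.add t p)) PySem.Dict.empty)) s PySem.Set.empty)) PySem.Set.empty)
      ↔ (q ∈ ps ∧ g q ∈ pvSubw a) := by
    intro q
    rw [pv_mem_foldl_union]
    simp only [hpos, List.mem_filter, decide_eq_true_eq]
    constructor
    · rintro (h | ⟨sk, hsk, hq, rfl⟩)
      · exact absurd h (by simp [PySem.Set.empty])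
      · exact ⟨hq, hsk⟩
    · rintro ⟨hq, hmem⟩
      exact Or.inr ⟨g q, hmem, hq, rfl⟩
  rw [hbig]
  set big := ps.filter (fun p => decide (a ∈ pvSubw (g p))) with hbigdef
  have hbignd : big.Nodup := (hps ▸ pv_nodup_pyRange longs.length).filter _
  set T := ps.filter (fun p => pvBCond a (g p)) with hT
  have hTnd : T.Nodup := (hps ▸ pv_nodup_pyRange longs.length).filter _
  have hTpair : T.Pairwise (· < ·) := (hps ▸ pv_pairwise_pyRange longs.length).filter _
  have hmemT : ∀ q, q ∈ PySem.Set.union big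
      ((pvSubw a).foldl
        (fun sm s => PySem.Set.union sm (PySem.Dict.getD
          ((ps.foldl
            (fun d p => PySem.Dict.modify d (PySem.List.pyGetD longs p "") PySem.Set.empty
              (fun t => PySem.Set.add t p)) PySem.Dict.empty)) s PySem.Set.empty)) PySem.Set.empty)
      ↔ q ∈ T := by
    intro q
    rw [PySem.Set.mem_union, hsmall, hbigdef, hT]
    simp only [List.mem_filter, decide_eq_true_eq]
    by_cases hq : q ∈ ps
    · simp only [hq, true_and]
      rw [pv_cond_iff a (g q) (hl a ha) (hl (g q) (hgm q hq))]
    · simp [hq]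
  have hsorted : PySem.List.sorted (PySem.Set.union big
      ((pvSubw a).foldl
        (fun sm s => PySem.Set.union sm (PySem.Dict.getD
          ((ps.foldl
            (fun d p => PySem.Dict.modify d (PySem.List.pyGetD longs p "") PySem.Set.empty
              (fun t => PySem.Set.add t p)) PySem.Dict.empty)) s PySem.Set.empty)) PySem.Set.empty))
      (fun x => x) = T := by
    apply PySem.List.sorted_eq_of_perm_of_pairwise_lt
    · exact (List.perm_ext_iff_of_nodup hTnd (PySem.Set.nodup_union _ _ hbignd)).mpr
        (fun q => (hmemT q).symm)
    · exact hTpair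
  rw [hsorted]
  rw [PySem.List.foldl_append_singleton_eq_map
    (fun p => if PySem.Set.contains big p then g p else a) T comp]
  congr 1
  have hmapc : T.map (fun p => if PySem.Set.contains big p then g p else a)
      = T.map (fun p => if PySem.Str.len a < PySem.Str.len (g p) then g p else a) := by
    apply List.map_congr_left
    intro p hp
    rw [hT, List.mem_filter] at hp
    obtain ⟨hpps, hpc⟩ := hp
    cases hcb : PySem.Set.contains big p with
    | true =>
      have hpb := (PySem.Set.contains_iff big p).mp hcb
      rw [hbigdef, List.mem_filter, decide_eq_true_eq] at hpb
      have hmem := (pv_mem_subw a (g p)).mp hpb.2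
      have hlt : PySem.Str.len a < PySem.Str.len (g p) := by omega
      rw [if_pos rfl, if_pos hlt]
    | false =>
      have hpb : ¬ a ∈ pvSubw (g p) := by
        intro hmem
        have : p ∈ big := by
          rw [hbigdef, List.mem_filter]; exact ⟨hpps, by simp [hmem]⟩
        rw [← PySem.Set.contains_iff big p] at this
        rw [hcb] at this; exact Bool.false_ne_true this
      have hcond := (pv_cond_iff a (g p) (hl a ha) (hl (g p) (hgm p hpps))).mp hpc
      have hmem : g p ∈ pvSubw a := by tauto
      have hlen := (pv_mem_subw (g p) a).mp hmem
      have hlt : ¬ PySem.Str.len a < PySem.Str.len (g p) := by omega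
      rw [if_neg Bool.false_ne_true, if_neg hlt]
  rw [hmapc]
  have hmapg : T.map g = longs.filter (fun b => pvBCond a b) := by
    rw [hT]
    have : (fun p => pvBCond a (g p)) = (fun b => pvBCond a b) ∘ g := rfl
    rw [this, ← List.filter_map]
    congr 1
    have hLen : PySem.List.len longs = (longs.length : Int) := rfl
    rw [hps, ← hLen]
    exact PySem.List.map_pyGetD_pyRange_zero longs ""
  calc T.map (fun p => if PySem.Str.len a < PySem.Str.len (g p) then g p else a)
      = (T.map g).map (fun b => if PySem.Str.len a < PySem.Str.len b then b else a) := by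
        rw [List.map_map]; rfl
    _ = pvRow longs a := by rw [hmapg]; rfl

-- B's compounds equal A's row decomposition
theorem pv_main (ws : List String) : filter_from_compounds ws = filter_from_compounds_alt ws := by
  unfold filter_from_compounds filter_from_compounds_alt
  simp only []
  rw [pv_compounds_eq ws]
  set longs := ws.filter (fun w => 2 < PySem.Str.len w) with hlongs
  have hl : ∀ x ∈ longs, 2 < PySem.Str.len x := by
    intro x hx
    rw [hlongs, List.mem_filter] at hx
    simpa using hx.2
  rw [PySem.List.foldl_prod_mk
    (f := fun c p => (PySem.List.pyGetD (longs.map pvSubw) p PySem.Set.empty).foldl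
        (fun c s => PySem.Dict.modify c s PySem.Set.empty (fun t => PySem.Set.add t p)) c)
    (g := fun d p => PySem.Dict.modify d (PySem.List.pyGetD longs p "") PySem.Set.empty
        (fun t => PySem.Set.add t p))]
  have hzip : longs.zip (longs.map pvSubw) = longs.map (fun a => (a, pvSubw a)) := by
    have h := List.zip_map' (f := fun a => a) (g := pvSubw) (l := longs)
    simpa using h
  rw [hzip, List.foldl_map]
  dsimp only
  have hcomp :
      List.foldl
        (fun (comp : List String) (a : String) =>
          (PySem.List.sorted
              (PySem.Set.union
                (PySem.Dict.getD
                  (((PySem.List.pyRange 0 (longs.length : Int) 1).foldl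
                    (fun c p => (PySem.List.pyGetD (longs.map pvSubw) p PySem.Set.empty).foldl
                        (fun c s => PySem.Dict.modify c s PySem.Set.empty (fun t => PySem.Set.add t p)) c)
                    PySem.Dict.empty))
                  a PySem.Set.empty)
                ((pvSubw a).foldl
                  (fun sm s => PySem.Set.union sm (PySem.Dict.getD
                    (((PySem.List.pyRange 0 (longs.length : Int) 1).foldl
                      (fun d p => PySem.Dict.modify d (PySem.List.pyGetD longs p "") PySem.Set.empty
                        (fun t => PySem.Set.add t p)) PySem.Dict.empty))
                    s PySem.Set.empty)) PySem.Set.empty))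
              (fun x => x)).foldl
            (fun comp p =>
              comp ++ [if PySem.Set.contains
                  (PySem.Dict.getD
                    (((PySem.List.pyRange 0 (longs.length : Int) 1).foldl
                      (fun c p => (PySem.List.pyGetD (longs.map pvSubw) p PySem.Set.empty).foldl
                          (fun c s => PySem.Dict.modify c s PySem.Set.empty (fun t => PySem.Set.add t p)) c)
                      PySem.Dict.empty))
                    a PySem.Set.empty) p
                then PySem.List.pyGetD longs p "" else a]) comp)
        [] longs
      = List.foldl (fun comp a => comp ++ pvRow longs a) [] longs :=
    PySem.List.foldl_congr_mem _ _ _ _ (fun comp a hmem => pv_row longs hl a hmem comp)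
  rw [hcomp]
  rw [PySem.List.foldl_append_eq_flatMap]
  simp only [List.nil_append]
  refine Prod.ext ?_ rfl
  apply List.filter_congr
  intro x _
  simp [PySem.Set.mem_ofList]

-- ===== VERDICT (by name: the statement is the Claim_ definition above) =====
theorem filter_from_compounds_spec : Claim_equal_filter_from_compounds := by
  intro ws _
  unfold Spec_filter_from_compounds
  exact pv_main ws
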